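-- pv_equiv track=rewrite | github.com/a251231/AutoGLM-TERMUX | autoglm_web/schedule.py | is_valid_cron
-- ===== SOURCE A (Python) =====
-- def _parse_field(field: str, min_v: int, max_v: int) -> set[int]:
--     """
--     解析单个 cron 字段，支持 *, */n, 逗号、范围。输入已 strip。
--     """
--     values: set[int] = set()
--     if field == "*":
--         return set(range(min_v, max_v + 1))
--     for part in field.split(","):
--         part = part.strip()
--         if not part:
--             continue
--         step = 1
--         if "/" in part:
--             base, step_s = part.split("/", 1)
--             try:
--                 step = int(step_s)
--             except Exception:
--                 return set()
--             part = base or "*"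
--         if part == "*":
--             start, end = min_v, max_v
--         elif "-" in part:
--             a, b = part.split("-", 1)
--             try:
--                 start, end = int(a), int(b)
--             except Exception:
--                 return set()
--         else:
--             try:
--                 val = int(part)
--             except Exception:
--                 return set()
--             start = end = val
--         start = max(min_v, start)
--         end = min(max_v, end)
--         if step <= 0:
--             return set()
--         for v in range(start, end + 1, step):
--             values.add(v)
--     return values
--
-- def is_valid_cron(expr: str) -> bool:
--     parts = expr.strip().split()
--     if len(parts) != 6:
--         return False
--     ranges = [(0, 59), (0, 59), (0, 23), (1, 31), (1, 12), (0, 7)]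
--     for field, (lo, hi) in zip(parts, ranges):
--         if not _parse_field(field.strip(), lo, hi):
--             return False
--     return True
-- ===== SOURCE B (Python) =====
-- _BOUNDS = [(0, 59), (0, 59), (0, 23), (1, 31), (1, 12), (0, 7)]
--
-- def _span(part, lo, hi):
--     """One non-blank, stripped part -> None on a hard error,
--     else the clamped (start, end) span (possibly empty)."""
--     step = 1
--     if "/" in part:
--         head, tail = part.split("/", 1)
--         try:
--             step = int(tail)
--         except ValueError:
--             return None
--         part = head if head else "*"
--     if step <= 0:
--         return None
--     if part == "*":
--         return (lo, hi)
--     if "-" in part: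
--         a, b = part.split("-", 1)
--     else:
--         a = b = part
--     try:
--         s, e = int(a), int(b)
--     except ValueError:
--         return None
--     return (max(lo, s), min(hi, e))
--
-- def _field_ok(parts, lo, hi):
--     hit = False
--     for raw in parts:
--         p = raw.strip()
--         if not p:
--             continue
--         sp = _span(p, lo, hi)
--         if sp is None:
--             return False
--         if sp[0] <= sp[1]:
--             hit = True
--     return hit
--
-- def is_valid_cron(expr):
--     fields = expr.strip().split()
--     if len(fields) != 6:
--         return False
--     for f, (lo, hi) in zip(fields, _BOUNDS):
--         if not _field_ok(f.strip().split(","), lo, hi):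
--             return False
--     return True
-- ===== Notes on version B (the rewrite author's own statement) =====
-- stated objective: simpler
-- what changed: B never materialises sets of allowed values: each part is parsed once into an optional clamped (start,end) span and a per-field has-value flag is folded over the parts, so the range() expansion and the set emptiness test disappear.
import Mathlib
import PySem

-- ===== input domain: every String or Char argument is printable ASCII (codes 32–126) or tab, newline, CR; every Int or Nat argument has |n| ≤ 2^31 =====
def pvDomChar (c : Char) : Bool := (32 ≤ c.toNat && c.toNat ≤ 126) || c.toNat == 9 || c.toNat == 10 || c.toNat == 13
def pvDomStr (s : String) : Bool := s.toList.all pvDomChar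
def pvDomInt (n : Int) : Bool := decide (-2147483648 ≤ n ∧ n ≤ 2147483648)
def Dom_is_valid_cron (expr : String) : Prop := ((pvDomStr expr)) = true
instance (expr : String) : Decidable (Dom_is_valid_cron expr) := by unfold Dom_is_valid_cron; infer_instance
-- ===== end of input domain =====

-- B replaces A's materialised sets of allowed values by a per-field has-value flag
-- folded over the parts' clamped spans (objective: simpler, same results).

-- ===== PORT A =====

-- 'step = 1; if "/" in part: base, step_s = part.split("/", 1); step = int(step_s); part = base or "*"'
-- (none = the 'except: return set()' exit; the '| _ => none' arms are unreachable: the split yields two pieces)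
def pvStepA (part : String) : Option (Int × String) :=
  if PySem.Str.isIn "/" part then
    match PySem.Str.splitMax? part "/" 1 with
    | some (base :: step_s :: _) =>
      match PySem.Int.ofStr? step_s with
      | some st => some (st, if base = "" then "*" else base)
      | none => none
    | _ => none
  else some (1, part)

-- the '*' / 'a-b' / single-int branch chain computing (start, end); none = int-parse failure
def pvSeA (part : String) (min_v max_v : Int) : Option (Int × Int) :=
  if part = "*" then some (min_v, max_v)
  else if PySem.Str.isIn "-" part then
    match PySem.Str.splitMax? part "-" 1 with
    | some (a :: b :: _) =>
      match PySem.Int.ofStr? a, PySem.Int.ofStr? b with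
      | some s, some e => some (s, e)
      | _, _ => none
    | _ => none
  else
    match PySem.Int.ofStr? part with
    | some v => some (v, v)
    | none => none

-- the 'for part in field.split(",")' loop of _parse_field; 'values' is the Python set
def pvPfLoop (min_v max_v : Int) : List String → PySem.Set Int → PySem.Set Int
  | [], values => values
  | p :: rest, values =>
    let part := PySem.Str.strip p
    if part = "" then pvPfLoop min_v max_v rest values
    else
      match pvStepA part with
      | none => PySem.Set.empty
      | some (step, part') =>
        match pvSeA part' min_v max_v with
        | none => PySem.Set.empty
        | some (s0, e0) =>
          let start := max min_v s0
          let «end» := min max_v e0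
          if step ≤ 0 then PySem.Set.empty
          else pvPfLoop min_v max_v rest
            ((PySem.List.pyRange start («end» + 1) step).foldl PySem.Set.add values)

def pvParseField (field : String) (min_v max_v : Int) : PySem.Set Int :=
  if field = "*" then PySem.Set.ofList (PySem.List.pyRange min_v (max_v + 1) 1)
  else pvPfLoop min_v max_v ((PySem.Str.split? field ",").getD []) PySem.Set.empty

def is_valid_cron (expr : String) : Bool :=
  let parts := PySem.Str.split₀ (PySem.Str.strip expr)
  if parts.length ≠ 6 then false
  else
    let ranges : List (Int × Int) := [(0, 59), (0, 59), (0, 23), (1, 31), (1, 12), (0, 7)]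
    (parts.zip ranges).all fun fr =>
      !(pvParseField (PySem.Str.strip fr.1) fr.2.1 fr.2.2).isEmpty

-- ===== PORT B =====

-- _span: one part → none on a hard error, else the clamped (start, end) span
def pvSpan? (part : String) (lo hi : Int) : Option (Int × Int) :=
  let slashed :=
    if PySem.Str.isIn "/" part then
      match PySem.Str.splitMax? part "/" 1 with
      | some (head :: tail :: _) =>
        (PySem.Int.ofStr? tail).map (fun st => (st, if head = "" then "*" else head))
      | _ => none
    else some (1, part)
  match slashed with
  | none => none
  | some (step, body) =>
    if step ≤ 0 then none
    else if body = "*" then some (lo, hi)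
    else
      let ab :=
        if PySem.Str.isIn "-" body then
          match PySem.Str.splitMax? body "-" 1 with
          | some (a :: b :: _) => (a, b)
          | _ => ("", "")        -- unreachable: split with a present separator gives two pieces
        else (body, body)
      match PySem.Int.ofStr? ab.1, PySem.Int.ofStr? ab.2 with
      | some s, some e => some (max lo s, min hi e)
      | _, _ => none

-- _field_ok's loop: 'hit' is the has-value flag; a failed part returns False at once
def pvFieldLoop (lo hi : Int) : List String → Bool → Bool
  | [], hit => hit
  | raw :: rest, hit =>
    let p := PySem.Str.strip raw
    if p = "" then pvFieldLoop lo hi rest hit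
    else
      match pvSpan? p lo hi with
      | none => false
      | some (s, e) => pvFieldLoop lo hi rest (hit || decide (s ≤ e))

-- the 'for f, (lo, hi) in zip(fields, _BOUNDS)' loop
def pvCheck : List String → List (Int × Int) → Bool
  | f :: fs, (lo, hi) :: bs =>
    pvFieldLoop lo hi ((PySem.Str.split? (PySem.Str.strip f) ",").getD []) false
      && pvCheck fs bs
  | _, _ => true

def is_valid_cron_alt (expr : String) : Bool :=
  let fields := PySem.Str.split₀ (PySem.Str.strip expr)
  if fields.length ≠ 6 then false
  else pvCheck fields [(0, 59), (0, 59), (0, 23), (1, 31), (1, 12), (0, 7)]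

-- ===== PRECONDITION & SPEC =====
def Spec_is_valid_cron (expr : String) (out : Bool) : Prop := out = is_valid_cron_alt expr
instance (expr : String) (out : Bool) : Decidable (Spec_is_valid_cron expr out) := by unfold Spec_is_valid_cron; infer_instance

-- ===== CLAIM (what is proved, stated in full; the proofs are below) =====
def Claim_equal_is_valid_cron : Prop := ∀ (expr : String), Dom_is_valid_cron expr → Spec_is_valid_cron expr (is_valid_cron expr)

-- ===== LEMMAS AND PROOFS =====

-- B's span parser, characterised through A's two helpers (the '*' body needs no clamp: max lo lo = lo)
theorem pvSpan?_eq (p : String) (lo hi : Int) :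
    pvSpan? p lo hi =
      match pvStepA p with
      | none => none
      | some (step, body) =>
        if step ≤ 0 then none
        else match pvSeA body lo hi with
          | none => none
          | some (s, e) => some (max lo s, min hi e) := by
  unfold pvSpan? pvStepA pvSeA
  by_cases h : PySem.Str.isIn "/" p = true
  · simp only [h, if_true]
    cases hs : PySem.Str.splitMax? p "/" 1 with
    | none => simp
    | some l =>
      match l with
      | [] => simp
      | [a] => simp
      | a :: b :: t =>
        cases hb : PySem.Int.ofStr? b with
        | none => simp [hb]
        | some st =>
          simp only [hb, Option.map_some]
          by_cases hst : st ≤ 0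
          · simp [hst]
          · by_cases hstar : (if a = "" then "*" else a) = "*"
            · simp [hst, hstar]
            · simp only [if_neg hst, if_neg hstar]
              by_cases hd : PySem.Str.isIn "-" (if a = "" then "*" else a) = true
              · simp only [hd, if_true]
                have he : PySem.Int.ofStr? "" = none := by decide
                cases PySem.Str.splitMax? (if a = "" then "*" else a) "-" 1 with
                | none => simp [he]
                | some l2 =>
                  match l2 with
                  | [] => simp [he]
                  | [x] => simp [he]
                  | x :: y :: t2 =>
                    cases hx : PySem.Int.ofStr? x <;> cases hy : PySem.Int.ofStr? y <;>
                      simp [hx, hy]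
              · simp only [Bool.not_eq_true] at hd
                simp only [hd, Bool.false_eq_true, if_false]
                cases PySem.Int.ofStr? (if a = "" then "*" else a) with
                | none => simp
                | some v => simp
  · simp only [Bool.not_eq_true] at h
    simp only [h, Bool.false_eq_true, if_false]
    by_cases hstar : p = "*"
    · simp [hstar]
    · simp only [show ¬ ((1 : Int) ≤ 0) by omega, if_neg hstar, if_false]
      by_cases hd : PySem.Str.isIn "-" p = true
      · simp only [hd, if_true]
        have he : PySem.Int.ofStr? "" = none := by decide
        cases PySem.Str.splitMax? p "-" 1 with
        | none => simp [he]
        | some l2 =>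
          match l2 with
          | [] => simp [he]
          | [x] => simp [he]
          | x :: y :: t2 =>
            cases hx : PySem.Int.ofStr? x <;> cases hy : PySem.Int.ofStr? y <;> simp [hx, hy]
      · simp only [Bool.not_eq_true] at hd
        simp only [hd, Bool.false_eq_true, if_false]
        cases PySem.Int.ofStr? p with
        | none => simp
        | some v => simp

theorem pv_add_ne_nil (s : PySem.Set Int) (x : Int) : PySem.Set.add s x ≠ [] := by
  rw [PySem.Set.add_eq_ite]
  split
  · rename_i h; intro hnil; rw [hnil] at h; simp at h
  · simp

theorem pv_foldl_add_eq_nil_iff (l : List Int) (s : PySem.Set Int) :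
    l.foldl PySem.Set.add s = [] ↔ s = [] ∧ l = [] := by
  induction l generalizing s with
  | nil => simp [List.foldl]
  | cons x t ih =>
    simp only [List.foldl, ih]
    constructor
    · rintro ⟨h, -⟩; exact absurd h (pv_add_ne_nil s x)
    · rintro ⟨-, h⟩; simp at h

theorem pv_pyRange_pos_eq_nil_iff (a b st : Int) (h : 0 < st) :
    PySem.List.pyRange a b st = [] ↔ b ≤ a := by
  constructor
  · intro hnil
    by_contra hba
    have hmem : a ∈ PySem.List.pyRange a b st := by
      rw [PySem.List.mem_pyRange_iff_of_pos h]
      exact ⟨le_refl a, by omega, by simp⟩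
    rw [hnil] at hmem; simp at hmem
  · intro hba
    rw [PySem.List.pyRange_of_pos a b h]
    simp [show ¬ a < b by omega]

-- A's set-building loop is nonempty exactly when B's flag loop, started at the
-- emptiness of the current set, ends up true
theorem pv_loop_eq (lo hi : Int) (parts : List String) (values : PySem.Set Int) :
    (!(pvPfLoop lo hi parts values).isEmpty) = pvFieldLoop lo hi parts (!values.isEmpty) := by
  induction parts generalizing values with
  | nil => simp [pvPfLoop, pvFieldLoop]
  | cons p rest ih =>
    rw [pvPfLoop, pvFieldLoop]
    by_cases hp : PySem.Str.strip p = ""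
    · simpa [hp] using ih values
    · rw [if_neg hp, if_neg hp, pvSpan?_eq]
      cases hsp : pvStepA (PySem.Str.strip p) with
      | none => simp [PySem.Set.empty]
      | some sp =>
        obtain ⟨step, part'⟩ := sp
        by_cases hst : step ≤ 0
        · cases hse : pvSeA part' lo hi <;> simp [hse, hst, PySem.Set.empty]
        · cases hse : pvSeA part' lo hi with
          | none => simp [hse, hst, PySem.Set.empty]
          | some se =>
            obtain ⟨s0, e0⟩ := se
            simp only [hse, if_neg hst, ih]
            have hrng := pv_pyRange_pos_eq_nil_iff (max lo s0) (min hi e0 + 1) step (by omega)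
            have hnonnil : ∀ (l : List Int), l ≠ [] → l.isEmpty = false :=
              fun l hl => List.isEmpty_eq_false_iff.mpr hl
            have hvals : (!((PySem.List.pyRange (max lo s0) (min hi e0 + 1) step).foldl
                PySem.Set.add values).isEmpty)
                  = (!values.isEmpty || decide (max lo s0 ≤ min hi e0)) := by
              by_cases hv : values = [] <;> by_cases hr : max lo s0 ≤ min hi e0
              · have : PySem.List.pyRange (max lo s0) (min hi e0 + 1) step ≠ [] := by
                  intro hc; rw [hrng] at hc; omega
                simp [hv, hr,
                  hnonnil _ (fun hc => this ((pv_foldl_add_eq_nil_iff _ _).mp hc).2)]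
              · have : PySem.List.pyRange (max lo s0) (min hi e0 + 1) step = [] := by
                  rw [hrng]; omega
                simp [hv, this]
                omega
              · simp [hr, hnonnil _ (fun hc => hv ((pv_foldl_add_eq_nil_iff _ _).mp hc).1),
                  hnonnil _ hv]
              · simp [hr, hnonnil _ (fun hc => hv ((pv_foldl_add_eq_nil_iff _ _).mp hc).1),
                  hnonnil _ hv]
            rw [hvals]

-- per field: A's set is nonempty iff B's flag loop (from false) returns true (needs lo ≤ hi for '*')
theorem pv_field_eq (f : String) (lo hi : Int) (hlohi : lo ≤ hi) :
    (!(pvParseField f lo hi).isEmpty)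
      = pvFieldLoop lo hi ((PySem.Str.split? f ",").getD []) false := by
  unfold pvParseField
  by_cases hf : f = "*"
  · subst hf
    have hsplit : (PySem.Str.split? "*" ",").getD [] = ["*"] := by decide
    rw [if_pos rfl, hsplit]
    have hmem : lo ∈ PySem.Set.ofList (PySem.List.pyRange lo (hi + 1) 1) := by
      rw [PySem.Set.mem_ofList, PySem.List.mem_pyRange_one]
      omega
    have hne : PySem.Set.ofList (PySem.List.pyRange lo (hi + 1) 1) ≠ [] :=
      List.ne_nil_of_mem hmem
    have hstar : pvSpan? "*" lo hi = some (lo, hi) := by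
      rw [pvSpan?_eq, show pvStepA "*" = some (1, "*") from by decide]
      simp [pvSeA]
    rw [pvFieldLoop]
    simp only [show PySem.Str.strip "*" = "*" from rfl]
    rw [if_neg (by decide), hstar]
    simp [pvFieldLoop, List.isEmpty_eq_false_iff, hne, hlohi]
  · rw [if_neg hf, pv_loop_eq]
    rfl

-- A's zip+all over the six fields is B's recursive two-list loop
theorem pv_zip_all (ps : List String) (rs : List (Int × Int))
    (h : ∀ r ∈ rs, r.1 ≤ r.2) :
    ((ps.zip rs).all fun fr => !(pvParseField (PySem.Str.strip fr.1) fr.2.1 fr.2.2).isEmpty)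
      = pvCheck ps rs := by
  induction ps generalizing rs with
  | nil => cases rs <;> simp [pvCheck]
  | cons p pt ih =>
    cases rs with
    | nil => simp [pvCheck]
    | cons r rt =>
      obtain ⟨lo, hi⟩ := r
      simp only [List.zip_cons_cons, List.all_cons, pvCheck]
      rw [pv_field_eq _ _ _ (h (lo, hi) (by simp)), ih rt (fun r' hr' => h r' (by simp [hr']))]

-- ===== VERDICT (by name: the statement is the Claim_ definition above) =====
theorem is_valid_cron_spec : Claim_equal_is_valid_cron := by
  intro expr _
  unfold Spec_is_valid_cron is_valid_cron is_valid_cron_alt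
  by_cases h6 : (PySem.Str.split₀ (PySem.Str.strip expr)).length ≠ 6
  · simp only [if_pos h6]
  · simp only [if_neg h6]
    exact pv_zip_all _ _ (by decide)
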